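-- pv_equiv track=rewrite | github.com/Ag3497120/verantyx-v6 | arc/world_commands.py | dilate_color
-- ===== SOURCE A (Python) =====
-- from collections import Counter, defaultdict
--
-- def _bg(g):
--     c = Counter()
--     for row in g: c.update(row)
--     return c.most_common(1)[0][0]
--
-- def _copy(g):
--     return [row[:] for row in g]
--
-- def dilate_color(g, color):
--     """特定色だけ膨張"""
--     h,w=len(g),len(g[0]); bg=_bg(g); res=_copy(g)
--     for r in range(h):
--         for c in range(w):
--             if g[r][c]==color:
--                 for dr,dc in [(-1,0),(1,0),(0,-1),(0,1)]:
--                     nr,nc=r+dr,c+dc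
--                     if 0<=nr<h and 0<=nc<w and res[nr][nc]==bg: res[nr][nc]=color
--     return res
-- ===== SOURCE B (Python) =====
-- from collections import Counter
--
-- def _bg(g):
--     c = Counter()
--     for row in g: c.update(row)
--     return c.most_common(1)[0][0]
--
-- def dilate_color(g, color):
--     """特定色だけ膨張 — output-centric gather: each cell inspects its own neighbors"""
--     h, w = len(g), len(g[0])
--     bg = _bg(g)
--     def cell(r, c):
--         if g[r][c] == bg and any(
--                 g[r + dr][c + dc] == color
--                 for dr, dc in ((-1, 0), (1, 0), (0, -1), (0, 1))
--                 if 0 <= r + dr < h and 0 <= c + dc < w):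
--             return color
--         return g[r][c]
--     return [[cell(r, c) for c in range(w)] for r in range(h)]
-- ===== Notes on version B (the rewrite author's own statement) =====
-- stated objective: alternative
-- what changed: A mutates a copy of the grid source-centrically (every color cell scatters writes into its bg neighbors of the partially-updated copy); B builds the output functionally and output-centrically (each cell independently gathers: it is color iff it is bg with a 4-neighbor equal to color in the original grid). Pre_ restricts to non-empty rectangular grids: A raises on empty or all-empty-row grids or rows shorter than the first, and on ragged grids with rows longer than the first A's preservation of the extra tail cells is an artefact of indexing by len(g[0]).
-- outside the precondition, e.g. on dilate_color([[0, 0], [0, 1, 5]], 1): A returns [[0, 1], [1, 1, 5]], B returns [[0, 1], [1, 1]]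
import Mathlib
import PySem

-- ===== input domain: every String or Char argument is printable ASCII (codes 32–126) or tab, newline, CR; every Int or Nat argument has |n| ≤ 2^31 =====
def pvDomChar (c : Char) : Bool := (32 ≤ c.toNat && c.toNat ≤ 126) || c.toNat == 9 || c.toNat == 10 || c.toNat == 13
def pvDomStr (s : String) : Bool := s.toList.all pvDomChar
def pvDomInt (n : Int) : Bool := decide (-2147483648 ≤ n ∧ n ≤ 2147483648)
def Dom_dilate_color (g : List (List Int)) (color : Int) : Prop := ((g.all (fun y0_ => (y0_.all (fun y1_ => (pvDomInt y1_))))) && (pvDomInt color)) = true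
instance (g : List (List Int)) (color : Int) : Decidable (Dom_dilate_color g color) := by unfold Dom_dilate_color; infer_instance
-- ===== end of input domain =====

-- B replaces A's in-place source-centric scatter (each color cell writes into its bg
-- neighbors of a mutable copy) by an output-centric gather (each output cell is computed
-- independently from its own neighbors in the original grid); same cost, no mutation.

-- ===== PORT A =====
-- shared helper: Python _bg (Counter over the rows, then most_common(1)[0][0]);
-- most_common(1) returns the FIRST key of maximal count in insertion order, ported as a first-max scan
def pyBg (g : List (List Int)) : Int :=
  let c : PySem.Dict Int Int :=
    g.foldl (fun d row => row.foldl (fun d x => d.modify x 0 (· + 1)) d) PySem.Dict.empty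
  ((c.items.foldl (fun best kv =>
      match best with
      | none => some kv
      | some b => if kv.2 > b.2 then some kv else some b) none).getD (0, 0)).1

-- g[r][c] (indices in range under Pre_, so getD's default is never used)
def cellGet (g : List (List Int)) (r c : Nat) : Int := (g.getD r []).getD c 0
-- res[r][c] = v (indices in range under Pre_)
def cellSet (g : List (List Int)) (r c : Nat) (v : Int) : List (List Int) :=
  g.set r ((g.getD r []).set c v)

def pyDirs : List (Int × Int) := [(-1, 0), (1, 0), (0, -1), (0, 1)]

-- body of A's innermost loop: one direction of one source cell
def dirStep (h w : Nat) (bg color : Int) (res : List (List Int)) (nr nc : Int) :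
    List (List Int) :=
  if 0 ≤ nr ∧ nr < (h : Int) ∧ 0 ≤ nc ∧ nc < (w : Int) ∧ cellGet res nr.toNat nc.toNat = bg
  then cellSet res nr.toNat nc.toNat color else res

-- A's body for one source cell (r, c)
def srcStep (g : List (List Int)) (h w : Nat) (bg color : Int) (res : List (List Int))
    (p : Nat × Nat) : List (List Int) :=
  if cellGet g p.1 p.2 = color then
    pyDirs.foldl (fun res d => dirStep h w bg color res ((p.1 : Int) + d.1) ((p.2 : Int) + d.2)) res
  else res

def dilate_color (g : List (List Int)) (color : Int) : List (List Int) :=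
  let h := g.length
  let w := (g.headD []).length          -- len(g[0]); Pre_ excludes g = []
  let bg := pyBg g
  (List.range h).foldl (fun res r =>
    (List.range w).foldl (fun res c => srcStep g h w bg color res (r, c)) res) g

-- ===== PORT B =====
-- any(g[r+dr][c+dc] == color for dr,dc in dirs if in range)
def nbrHit (g : List (List Int)) (h w : Nat) (color : Int) (r c : Nat) : Bool :=
  pyDirs.any (fun d =>
    decide (0 ≤ (r : Int) + d.1 ∧ (r : Int) + d.1 < (h : Int) ∧
            0 ≤ (c : Int) + d.2 ∧ (c : Int) + d.2 < (w : Int)) &&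
    (cellGet g ((r : Int) + d.1).toNat ((c : Int) + d.2).toNat == color))

def dilate_color_alt (g : List (List Int)) (color : Int) : List (List Int) :=
  let h := g.length
  let w := (g.headD []).length
  let bg := pyBg g
  (List.range h).map (fun r =>
    (List.range w).map (fun c =>
      if cellGet g r c = bg ∧ nbrHit g h w color r c then color
      else cellGet g r c))

-- ===== PRECONDITION & SPEC =====
-- Pre_ restricts to non-empty rectangular grids: A raises on g = [] (len(g[0])), on
-- grids whose rows are all empty (most_common(1)[0] of an empty Counter) and on grids
-- with a row shorter than len(g[0]) (IndexError in g[r][c]); on ragged grids with rows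
-- LONGER than the first row, A's preservation of the extra tail cells is an artefact of
-- indexing by len(g[0]), so those inputs are excluded too.
def Pre_dilate_color (g : List (List Int)) (color : Int) : Prop :=
  g ≠ [] ∧ g.headD [] ≠ [] ∧ ∀ row ∈ g, row.length = (g.headD []).length
instance (g : List (List Int)) (color : Int) : Decidable (Pre_dilate_color g color) := by
  unfold Pre_dilate_color; infer_instance
def pvWitness_dilate_color : List (List Int) × Int := ([[0, 0], [0, 1]], 1)
def Spec_dilate_color (g : List (List Int)) (color : Int) (out : List (List Int)) : Prop := out = dilate_color_alt g color
instance (g : List (List Int)) (color : Int) (out : List (List Int)) : Decidable (Spec_dilate_color g color out) := by unfold Spec_dilate_color; infer_instance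

-- ===== CLAIM (what is proved, stated in full; the proofs are below) =====
def Claim_equal_dilate_color : Prop := ∀ (g : List (List Int)) (color : Int), Dom_dilate_color g color → Pre_dilate_color g color → Spec_dilate_color g color (dilate_color g color)

-- ===== LEMMAS AND PROOFS =====

-- the cells a single source write can have painted so far, as a Bool predicate
def paintsB (g : List (List Int)) (h w : Nat) (bg color : Int) (p : Nat × Nat) (r c : Nat) :
    Bool :=
  decide (r < h) && decide (c < w) && (cellGet g r c == bg) && (cellGet g p.1 p.2 == color) &&
  pyDirs.any (fun d => ((r : Int) == (p.1 : Int) + d.1) && ((c : Int) == (p.2 : Int) + d.2))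

theorem length_cellSet (res : List (List Int)) (a b : Nat) (v : Int) :
    (cellSet res a b v).length = res.length := by
  simp [cellSet]

theorem getD_cellSet (res : List (List Int)) (a b : Nat) (v : Int) (r : Nat)
    (ha : a < res.length) :
    (cellSet res a b v).getD r [] = if r = a then (res.getD a []).set b v else res.getD r [] := by
  simp only [cellSet, List.getD, List.getElem?_set]
  by_cases h : r = a
  · subst h; simp [ha]
  · simp [h, Ne.symm h]

theorem cellGet_cellSet (res : List (List Int)) (a b : Nat) (v : Int) (r c : Nat)
    (ha : a < res.length) (hb : b < (res.getD a []).length) :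
    cellGet (cellSet res a b v) r c =
      if r = a ∧ c = b then v else cellGet res r c := by
  unfold cellGet
  rw [getD_cellSet res a b v r ha]
  by_cases hr : r = a
  · subst hr
    by_cases hc : c = b
    · subst hc
      simp only [List.getD] at hb ⊢
      simp [List.getElem?_set, hb]
    · simp [List.getD, List.getElem?_set, hc, Ne.symm hc]
  · simp [hr]

-- the loop invariant of A's scatter: res is g with exactly the pb-cells overwritten by color,
-- and pb holds only for in-range cells whose original value is bg
def ScInv (g : List (List Int)) (h w : Nat) (bg color : Int) (res : List (List Int))
    (pb : Nat → Nat → Bool) : Prop :=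
  res.length = g.length ∧ (∀ r, (res.getD r []).length = (g.getD r []).length) ∧
  (∀ r c, cellGet res r c = if pb r c then color else cellGet g r c) ∧
  (∀ r c, pb r c = true → r < h ∧ c < w ∧ cellGet g r c = bg)

-- invariant preserved by one direction-write of A
theorem dirStep_model (g : List (List Int)) (h w : Nat) (bg color : Int)
    (hh : h = g.length) (hw : ∀ row ∈ g, w ≤ row.length)
    (nr nc : Int) (res : List (List Int)) (pb : Nat → Nat → Bool)
    (hinv : ScInv g h w bg color res pb) :
    ScInv g h w bg color (dirStep h w bg color res nr nc)
      (fun r c => pb r c ||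
        (((r : Int) == nr) && ((c : Int) == nc) && decide (r < h) && decide (c < w) &&
          (cellGet g r c == bg))) := by
  obtain ⟨hlen, hrow, hval, hpb⟩ := hinv
  by_cases hcond : 0 ≤ nr ∧ nr < (h : Int) ∧ 0 ≤ nc ∧ nc < (w : Int) ∧
      cellGet res nr.toNat nc.toNat = bg
  · -- the write happens
    obtain ⟨h1, h2, h3, h4, h5⟩ := hcond
    have hresn : dirStep h w bg color res nr nc = cellSet res nr.toNat nc.toNat color := by
      simp [dirStep, h1, h2, h3, h4, h5]
    have hnr : nr.toNat < h := by omega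
    have hnc : nc.toNat < w := by omega
    have hnrlen : nr.toNat < res.length := by rw [hlen, ← hh]; exact hnr
    have hglt : nr.toNat < g.length := by omega
    have hnclen : nc.toNat < (res.getD nr.toNat []).length := by
      rw [hrow]
      have hm : g.getD nr.toNat [] ∈ g := by
        have := List.getElem_mem hglt
        simpa [List.getD, List.getElem?_eq_getElem hglt] using this
      have := hw _ hm
      omega
    -- the target's original value is bg
    have htgt : cellGet g nr.toNat nc.toNat = bg := by
      have hv := hval nr.toNat nc.toNat
      by_cases hp : pb nr.toNat nc.toNat
      · exact (hpb _ _ hp).2.2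
      · have hp' : pb nr.toNat nc.toNat = false := by simpa using hp
        rw [hp'] at hv; simp at hv; rw [← hv]; exact h5
    refine ⟨by rw [hresn, length_cellSet, hlen], ?_, ?_, ?_⟩
    · intro r
      rw [hresn, getD_cellSet _ _ _ _ _ hnrlen]
      by_cases hr : r = nr.toNat
      · subst hr; rw [if_pos rfl, List.length_set]; exact hrow _
      · rw [if_neg hr]; exact hrow r
    · intro r c
      beta_reduce
      rw [hresn, cellGet_cellSet _ _ _ _ _ _ hnrlen hnclen]
      by_cases hrc : r = nr.toNat ∧ c = nc.toNat
      · rw [if_pos hrc]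
        obtain ⟨hr, hc⟩ := hrc
        subst hr; subst hc
        have e1 : ((nr.toNat : Int) == nr) = true := by simp; omega
        have e2 : ((nc.toNat : Int) == nc) = true := by simp; omega
        have hcl : (pb nr.toNat nc.toNat ||
            (((nr.toNat : Int) == nr) && ((nc.toNat : Int) == nc) && decide (nr.toNat < h) &&
              decide (nc.toNat < w) && (cellGet g nr.toNat nc.toNat == bg))) = true := by
          rw [e1, e2, htgt]
          simp [hnr, hnc]
        simp only [hcl]
        simp
      · have hne : (((r : Int) == nr) && ((c : Int) == nc)) = false := by
          by_cases hr : r = nr.toNat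
          · have hc : c ≠ nc.toNat := by tauto
            have e : ((c : Int) == nc) = false := by simp; omega
            simp [e]
          · have e : ((r : Int) == nr) = false := by simp; omega
            simp [e]
        rw [if_neg hrc]
        simp only [hne, Bool.false_and, Bool.or_false]
        exact hval r c
    · intro r c hp
      rcases (Bool.or_eq_true _ _).mp hp with hp' | hcl'
      · exact hpb r c hp'
      · simp only [Bool.and_eq_true, beq_iff_eq, decide_eq_true_eq] at hcl'
        exact ⟨hcl'.1.1.2, hcl'.1.2, hcl'.2⟩
  · -- no write
    have hresn : dirStep h w bg color res nr nc = res := by simp [dirStep, hcond]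
    rw [hresn]
    refine ⟨hlen, hrow, ?_, ?_⟩
    · intro r c
      beta_reduce
      rcases Bool.eq_false_or_eq_true
          (((r : Int) == nr) && ((c : Int) == nc) && decide (r < h) && decide (c < w) &&
            (cellGet g r c == bg)) with hcl | hcl
      · rw [hcl, Bool.or_true, if_pos rfl]
        rcases Bool.eq_false_or_eq_true (pb r c) with hp | hp
        · rw [hval r c, hp]
          simp
        · -- clause true but the write condition failed: impossible
          exfalso
          simp only [Bool.and_eq_true, beq_iff_eq, decide_eq_true_eq] at hcl
          obtain ⟨⟨⟨⟨e1, e2⟩, e3⟩, e4⟩, e5⟩ := hcl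
          apply hcond
          have hv := hval r c; rw [hp] at hv; simp at hv
          refine ⟨by omega, by omega, by omega, by omega, ?_⟩
          have t1 : nr.toNat = r := by omega
          have t2 : nc.toNat = c := by omega
          rw [t1, t2, hv]; exact e5
      · rw [hcl, Bool.or_false]
        exact hval r c
    · intro r c hp
      rcases (Bool.or_eq_true _ _).mp hp with hp' | hcl'
      · exact hpb r c hp'
      · simp only [Bool.and_eq_true, beq_iff_eq, decide_eq_true_eq] at hcl'
        exact ⟨hcl'.1.1.2, hcl'.1.2, hcl'.2⟩

-- invariant through one full source cell (four directions)
theorem srcStep_model (g : List (List Int)) (h w : Nat) (bg color : Int)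
    (hh : h = g.length) (hw : ∀ row ∈ g, w ≤ row.length)
    (p : Nat × Nat) (res : List (List Int)) (pb : Nat → Nat → Bool)
    (hinv : ScInv g h w bg color res pb) :
    ScInv g h w bg color (srcStep g h w bg color res p)
      (fun r c => pb r c || paintsB g h w bg color p r c) := by
  by_cases hsrc : cellGet g p.1 p.2 = color
  · have hresn : srcStep g h w bg color res p = dirStep h w bg color
        (dirStep h w bg color
          (dirStep h w bg color
            (dirStep h w bg color res ((p.1 : Int) + (-1)) ((p.2 : Int) + 0))
            ((p.1 : Int) + 1) ((p.2 : Int) + 0))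
          ((p.1 : Int) + 0) ((p.2 : Int) + (-1)))
        ((p.1 : Int) + 0) ((p.2 : Int) + 1) := by
      simp only [srcStep, if_pos hsrc, pyDirs, List.foldl_cons, List.foldl_nil]
    have s1 := dirStep_model g h w bg color hh hw ((p.1 : Int) + (-1)) ((p.2 : Int) + 0)
      res pb hinv
    have s2 := dirStep_model g h w bg color hh hw ((p.1 : Int) + 1) ((p.2 : Int) + 0) _ _ s1
    have s3 := dirStep_model g h w bg color hh hw ((p.1 : Int) + 0) ((p.2 : Int) + (-1)) _ _ s2
    have s4 := dirStep_model g h w bg color hh hw ((p.1 : Int) + 0) ((p.2 : Int) + 1) _ _ s3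
    rw [hresn]
    -- the accumulated predicate equals pb ∨ paintsB
    have hpbeq : ∀ r c,
        ((((pb r c ||
          (((r : Int) == (p.1 : Int) + (-1)) && ((c : Int) == (p.2 : Int) + 0) &&
            decide (r < h) && decide (c < w) && (cellGet g r c == bg))) ||
          (((r : Int) == (p.1 : Int) + 1) && ((c : Int) == (p.2 : Int) + 0) &&
            decide (r < h) && decide (c < w) && (cellGet g r c == bg))) ||
          (((r : Int) == (p.1 : Int) + 0) && ((c : Int) == (p.2 : Int) + (-1)) &&
            decide (r < h) && decide (c < w) && (cellGet g r c == bg))) ||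
          (((r : Int) == (p.1 : Int) + 0) && ((c : Int) == (p.2 : Int) + 1) &&
            decide (r < h) && decide (c < w) && (cellGet g r c == bg))) =
        (pb r c || paintsB g h w bg color p r c) := by
      intro r c
      have hcv : (cellGet g p.1 p.2 == color) = true := by simpa using hsrc
      rw [Bool.eq_iff_iff]
      simp only [paintsB, pyDirs, List.any_cons, List.any_nil, hcv, Bool.or_eq_true,
        Bool.and_eq_true, Bool.or_false, Bool.and_true, beq_iff_eq, decide_eq_true_eq,
        Bool.true_and, Bool.false_or, Bool.and_false]
      tauto
    obtain ⟨l4, r4, v4, b4⟩ := s4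
    refine ⟨l4, r4, ?_, ?_⟩
    · intro r c
      rw [v4 r c]
      beta_reduce
      rw [hpbeq r c]
    · intro r c hp
      have hp2 : (pb r c || paintsB g h w bg color p r c) = true := hp
      rw [← hpbeq r c] at hp2
      exact b4 r c hp2
  · have hresn : srcStep g h w bg color res p = res := by simp [srcStep, hsrc]
    have hcl : ∀ r c, paintsB g h w bg color p r c = false := by
      intro r c
      have e : (cellGet g p.1 p.2 == color) = false := by simpa using hsrc
      simp [paintsB, e]
    rw [hresn]
    obtain ⟨hlen, hrow, hval, hpb⟩ := hinv
    refine ⟨hlen, hrow, ?_, ?_⟩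
    · intro r c
      beta_reduce
      rw [hval r c]
      simp [hcl r c]
    · intro r c hp
      have hp2 : (pb r c || paintsB g h w bg color p r c) = true := hp
      rw [hcl r c, Bool.or_false] at hp2
      exact hpb r c hp2

-- invariant through any list of source cells
theorem scatter_model (g : List (List Int)) (h w : Nat) (bg color : Int)
    (hh : h = g.length) (hw : ∀ row ∈ g, w ≤ row.length)
    (l : List (Nat × Nat)) (res : List (List Int)) (pb : Nat → Nat → Bool)
    (hinv : ScInv g h w bg color res pb) :
    ScInv g h w bg color (l.foldl (srcStep g h w bg color) res)
      (fun r c => pb r c || l.any (fun p => paintsB g h w bg color p r c)) := by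
  induction l generalizing res pb with
  | nil => simpa using hinv
  | cons p l ih =>
    have step := srcStep_model g h w bg color hh hw p res pb hinv
    have rest := ih _ _ step
    rw [List.foldl_cons]
    obtain ⟨l2, r2, v2, b2⟩ := rest
    refine ⟨l2, r2, ?_, ?_⟩
    · intro r c
      rw [v2 r c]
      beta_reduce
      congr 1
      simp [Bool.or_assoc, List.any_cons]
    · intro r c hp
      apply b2 r c
      show (pb r c || paintsB g h w bg color p r c ||
        l.any fun q => paintsB g h w bg color q r c) = true
      have hp2 : (pb r c || (p :: l).any fun q => paintsB g h w bg color q r c) = true := hp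
      rw [List.any_cons] at hp2
      simpa [Bool.or_assoc] using hp2

-- the four-neighbor condition, in plain Nat form
def NbrProp (g : List (List Int)) (h w : Nat) (color : Int) (r c : Nat) : Prop :=
  (1 ≤ r ∧ cellGet g (r - 1) c = color) ∨ (r + 1 < h ∧ cellGet g (r + 1) c = color) ∨
  (1 ≤ c ∧ cellGet g r (c - 1) = color) ∨ (c + 1 < w ∧ cellGet g r (c + 1) = color)

theorem nbrHit_iff (g : List (List Int)) (h w : Nat) (color : Int) (r c : Nat)
    (hr : r < h) (hc : c < w) :
    nbrHit g h w color r c = true ↔ NbrProp g h w color r c := by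
  simp only [nbrHit, pyDirs, List.any_cons, List.any_nil, Bool.or_eq_true, Bool.and_eq_true,
    decide_eq_true_eq, beq_iff_eq, Bool.or_false, NbrProp]
  constructor
  · rintro (⟨hb, hv⟩ | ⟨hb, hv⟩ | ⟨hb, hv⟩ | ⟨hb, hv⟩)
    · refine Or.inl ⟨by omega, ?_⟩
      have e1 : ((r : Int) + -1).toNat = r - 1 := by omega
      have e2 : ((c : Int) + 0).toNat = c := by omega
      rwa [e1, e2] at hv
    · refine Or.inr (Or.inl ⟨by omega, ?_⟩)
      have e1 : ((r : Int) + 1).toNat = r + 1 := by omega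
      have e2 : ((c : Int) + 0).toNat = c := by omega
      rwa [e1, e2] at hv
    · refine Or.inr (Or.inr (Or.inl ⟨by omega, ?_⟩))
      have e1 : ((r : Int) + 0).toNat = r := by omega
      have e2 : ((c : Int) + -1).toNat = c - 1 := by omega
      rwa [e1, e2] at hv
    · refine Or.inr (Or.inr (Or.inr ⟨by omega, ?_⟩))
      have e1 : ((r : Int) + 0).toNat = r := by omega
      have e2 : ((c : Int) + 1).toNat = c + 1 := by omega
      rwa [e1, e2] at hv
  · rintro (⟨hb, hv⟩ | ⟨hb, hv⟩ | ⟨hb, hv⟩ | ⟨hb, hv⟩)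
    · refine Or.inl ⟨by omega, ?_⟩
      have e1 : ((r : Int) + -1).toNat = r - 1 := by omega
      have e2 : ((c : Int) + 0).toNat = c := by omega
      rw [e1, e2]; exact hv
    · refine Or.inr (Or.inl ⟨by omega, ?_⟩)
      have e1 : ((r : Int) + 1).toNat = r + 1 := by omega
      have e2 : ((c : Int) + 0).toNat = c := by omega
      rw [e1, e2]; exact hv
    · refine Or.inr (Or.inr (Or.inl ⟨by omega, ?_⟩))
      have e1 : ((r : Int) + 0).toNat = r := by omega
      have e2 : ((c : Int) + -1).toNat = c - 1 := by omega
      rw [e1, e2]; exact hv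
    · refine Or.inr (Or.inr (Or.inr ⟨by omega, ?_⟩))
      have e1 : ((r : Int) + 0).toNat = r := by omega
      have e2 : ((c : Int) + 1).toNat = c + 1 := by omega
      rw [e1, e2]; exact hv

-- the scatter's painted set equals the gather's neighbor test
theorem any_paintsB_iff (g : List (List Int)) (h w : Nat) (bg color : Int)
    (r c : Nat) (hr : r < h) (hc : c < w) :
    (((List.range h).flatMap (fun a => (List.range w).map (fun b => (a, b)))).any
        (fun p => paintsB g h w bg color p r c)) =
      ((cellGet g r c == bg) && nbrHit g h w color r c) := by
  rw [Bool.eq_iff_iff]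
  rw [show ((cellGet g r c == bg) && nbrHit g h w color r c) = true ↔
      (cellGet g r c = bg ∧ NbrProp g h w color r c) by
    rw [Bool.and_eq_true, beq_iff_eq, nbrHit_iff g h w color r c hr hc]]
  simp only [List.any_eq_true, List.mem_flatMap, List.mem_map, List.mem_range, paintsB,
    pyDirs, List.any_cons, List.any_nil, Bool.and_eq_true, Bool.or_eq_true, beq_iff_eq,
    decide_eq_true_eq, Bool.or_false]
  constructor
  · rintro ⟨p, ⟨a, ha, b, hb, hpab⟩, ⟨⟨⟨⟨_, _⟩, hbg⟩, hcol⟩, hdir⟩⟩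
    subst hpab
    refine ⟨hbg, ?_⟩
    unfold NbrProp
    rcases hdir with ⟨e1, e2⟩ | ⟨e1, e2⟩ | ⟨e1, e2⟩ | ⟨e1, e2⟩
    · refine Or.inr (Or.inl ⟨by omega, ?_⟩)
      have : r + 1 = a ∧ c = b := by omega
      rw [this.1, this.2]; exact hcol
    · refine Or.inl ⟨by omega, ?_⟩
      have : r - 1 = a ∧ c = b := by omega
      rw [this.1, this.2]; exact hcol
    · refine Or.inr (Or.inr (Or.inr ⟨by omega, ?_⟩))
      have : r = a ∧ c + 1 = b := by omega
      rw [this.1, this.2]; exact hcol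
    · refine Or.inr (Or.inr (Or.inl ⟨by omega, ?_⟩))
      have : r = a ∧ c - 1 = b := by omega
      rw [this.1, this.2]; exact hcol
  · rintro ⟨hbg, (⟨hb, hv⟩ | ⟨hb, hv⟩ | ⟨hb, hv⟩ | ⟨hb, hv⟩)⟩
    · exact ⟨(r - 1, c), ⟨r - 1, by omega, c, hc, rfl⟩,
        ⟨⟨⟨⟨hr, hc⟩, hbg⟩, hv⟩, Or.inr (Or.inl ⟨by omega, by omega⟩)⟩⟩
    · exact ⟨(r + 1, c), ⟨r + 1, hb, c, hc, rfl⟩,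
        ⟨⟨⟨⟨hr, hc⟩, hbg⟩, hv⟩, Or.inl ⟨by omega, by omega⟩⟩⟩
    · exact ⟨(r, c - 1), ⟨r, hr, c - 1, by omega, rfl⟩,
        ⟨⟨⟨⟨hr, hc⟩, hbg⟩, hv⟩, Or.inr (Or.inr (Or.inr ⟨by omega, by omega⟩))⟩⟩
    · exact ⟨(r, c + 1), ⟨r, hr, c + 1, hb, rfl⟩,
        ⟨⟨⟨⟨hr, hc⟩, hbg⟩, hv⟩, Or.inr (Or.inr (Or.inl ⟨by omega, by omega⟩))⟩⟩

-- assembling: on a rectangular grid the scatter result equals the gather result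
theorem scatter_eq_gather (g : List (List Int)) (color : Int)
    (hrect : ∀ row ∈ g, row.length = (g.headD []).length) :
    dilate_color g color = dilate_color_alt g color := by
  simp only [dilate_color, dilate_color_alt]
  set w := (g.headD []).length with hwdef
  set bg := pyBg g with hbgdef
  set h := g.length with hhdef
  have hwle : ∀ row ∈ g, w ≤ row.length := fun row hm => le_of_eq (hrect row hm).symm
  -- A's double loop is the fold over the flattened source list
  have hsrcs : (List.range h).foldl (fun res r =>
      (List.range w).foldl (fun res c => srcStep g h w bg color res (r, c)) res) g =
      ((List.range h).flatMap (fun r => (List.range w).map (fun c => (r, c)))).foldl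
        (srcStep g h w bg color) g := by
    rw [List.foldl_flatMap]
    simp only [List.foldl_map]
  rw [hsrcs]
  have hinv0 : ScInv g h w bg color g (fun _ _ => false) := by
    refine ⟨rfl, fun r => rfl, fun r c => by simp, fun r c hpF => by simp at hpF⟩
  obtain ⟨hlen, hrow, hval, -⟩ := scatter_model g h w bg color hhdef hwle
    ((List.range h).flatMap (fun r => (List.range w).map (fun c => (r, c)))) g
    (fun _ _ => false) hinv0
  apply List.ext_getElem
  · rw [hlen, List.length_map, List.length_range]
  · intro n h1 h2
    have hn : n < g.length := by rw [hlen] at h1; exact h1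
    have hnh : n < h := by rw [hhdef]; exact hn
    have hgetDn : ∀ (res : List (List Int)) (hlt : n < res.length),
        res.getD n [] = res[n]'hlt := by
      intro res hlt
      simp [List.getD, List.getElem?_eq_getElem hlt]
    have hgn : g.getD n [] = g[n]'hn := hgetDn g hn
    have hBrow : ((List.range h).map (fun r =>
        (List.range w).map (fun c =>
          if cellGet g r c = bg ∧ nbrHit g h w color r c then color
          else cellGet g r c)))[n]'h2 =
        (List.range w).map (fun c =>
          if cellGet g n c = bg ∧ nbrHit g h w color n c then color
          else cellGet g n c) := by
      rw [List.getElem_map, List.getElem_range]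
    rw [hBrow, ← hgetDn _ h1]
    have hwrow : (g.getD n []).length = w := by
      rw [hgn]
      exact hrect _ (List.getElem_mem hn)
    have hrown := hrow n
    apply List.ext_getElem
    · rw [hrown, List.length_map, List.length_range]
      omega
    · intro j hj1 hj2
      have hgd : ∀ (l : List Int) (hj : j < l.length), l.getD j 0 = l[j]'hj := by
        intro l hj
        simp [List.getD, List.getElem?_eq_getElem hj]
      have hjw : j < w := by
        rw [List.length_map, List.length_range] at hj2; exact hj2
      -- left side: the scatter model value
      rw [← hgd _ hj1]
      have hL : ((((List.range h).flatMap
          (fun r => (List.range w).map (fun c => (r, c)))).foldl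
            (srcStep g h w bg color) g).getD n []).getD j 0 =
          if (((List.range h).flatMap (fun r => (List.range w).map (fun c => (r, c)))).any
              fun p => paintsB g h w bg color p n j) = true then color else cellGet g n j := by
        have := hval n j
        simpa [cellGet] using this
      rw [hL]
      rw [any_paintsB_iff g h w bg color n j hnh hjw]
      have hBj? : ((List.range w).map (fun c =>
          if cellGet g n c = bg ∧ nbrHit g h w color n c then color
          else cellGet g n c))[j]? =
          some (if cellGet g n j = bg ∧ nbrHit g h w color n j then color
          else cellGet g n j) := by
        simp [List.getElem?_map, List.getElem?_range, hjw]
      rw [List.getElem?_eq_getElem hj2] at hBj?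
      rw [Option.some.inj hBj?]
      by_cases hbg : cellGet g n j = bg
      · by_cases hhit : nbrHit g h w color n j = true
        · simp [hbg, hhit]
        · have hf : nbrHit g h w color n j = false := by simpa using hhit
          simp [hbg, hf]
      · have hf : (cellGet g n j == bg) = false := by simpa using hbg
        simp [hbg, hf]

-- ===== VERDICT (by name: the statement is the Claim_ definition above) =====
theorem dilate_color_spec : Claim_equal_dilate_color := by
  unfold Claim_equal_dilate_color Spec_dilate_color
  rintro g color - ⟨-, -, hrect⟩
  exact scatter_eq_gather g color hrect
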